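-- pv_equiv track=rewrite | github.com/m-atkinson/shorts-segment-ranking | runs/synthdata_v1/generate_synth_batch_v1.py | normalize_guest
-- ===== SOURCE A (Python) =====
-- from typing import List, Tuple
--
-- def normalize_guest(name: str) -> Tuple[str, str]:
--     g = (name or "").strip()
--     if not g:
--         g = "Unknown"
--     slug = g.lower().strip()
--     slug = "-".join(slug.split())
--     slug = ''.join(ch for ch in slug if ch.isalnum() or ch == '-')
--     if not slug:
--         slug = "unknown"
--     return g, slug
-- ===== SOURCE B (Python) =====
-- def normalize_guest(name):
--     g = (name or "").strip()
--     if not g: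
--         g = "Unknown"
--     chars = []
--     prev_space = False
--     for ch in g.lower():
--         if ch.isspace():
--             if not prev_space:
--                 chars.append('-')
--             prev_space = True
--         else:
--             prev_space = False
--             if ch.isalnum() or ch == '-':
--                 chars.append(ch)
--     slug = ''.join(chars)
--     return g, slug if slug else "unknown"
-- ===== Notes on version B (the rewrite author's own statement) =====
-- stated objective: alternative
-- what changed: Replaced the strip/lower/split/join/filter string-pipeline (several passes and intermediate lists) with a single left-to-right scan over the lowered name that emits one dash at the start of each whitespace run and keeps the slug characters.
import Mathlib
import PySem

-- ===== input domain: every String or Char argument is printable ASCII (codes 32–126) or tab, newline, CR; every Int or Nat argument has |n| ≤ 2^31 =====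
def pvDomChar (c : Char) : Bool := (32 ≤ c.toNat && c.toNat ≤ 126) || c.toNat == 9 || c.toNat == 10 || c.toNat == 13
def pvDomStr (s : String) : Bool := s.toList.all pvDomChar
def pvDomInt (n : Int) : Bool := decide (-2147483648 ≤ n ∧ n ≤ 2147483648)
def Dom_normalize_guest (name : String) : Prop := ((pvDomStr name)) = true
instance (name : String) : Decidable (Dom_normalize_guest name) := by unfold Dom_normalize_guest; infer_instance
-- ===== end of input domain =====

-- B replaces A's strip/split/join/filter pipeline by one scan over the lowered name (same cost, different decomposition); return values agree everywhere.

-- ===== PORT A =====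
def normalize_guest (name : String) : String × String :=
  let g := PySem.Str.strip (if name == "" then "" else name)
  let g := if g == "" then "Unknown" else g
  let slug := PySem.Str.strip (PySem.Str.lower g)
  let slug := PySem.Str.join "-" (PySem.Str.split₀ slug)
  let slug := String.mk (slug.toList.filter (fun ch => PySem.Chars.isalnum ch || ch == '-'))
  let slug := if slug == "" then "unknown" else slug
  (g, slug)

-- ===== PORT B =====
-- the single scan: pending-separator flag `prevSpace`, output accumulator `acc`
def pvSlugLoop : List Char → List Char → Bool → List Char
  | [], acc, _ => acc
  | ch :: rest, acc, prevSpace =>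
    if PySem.Chars.isspace ch then
      pvSlugLoop rest (if prevSpace then acc else acc ++ ['-']) true
    else if PySem.Chars.isalnum ch || ch == '-' then
      pvSlugLoop rest (acc ++ [ch]) false
    else
      pvSlugLoop rest acc false

def normalize_guest_alt (name : String) : String × String :=
  let g := PySem.Str.strip (if name == "" then "" else name)
  let g := if g == "" then "Unknown" else g
  let slug := String.mk (pvSlugLoop (PySem.Str.lower g).toList [] false)
  let slug := if slug == "" then "unknown" else slug
  (g, slug)

-- ===== PRECONDITION & SPEC =====
def Spec_normalize_guest (name : String) (out : String × String) : Prop := out = normalize_guest_alt name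
instance (name : String) (out : String × String) : Decidable (Spec_normalize_guest name out) := by unfold Spec_normalize_guest; infer_instance

-- ===== CLAIM (what is proved, stated in full; the proofs are below) =====
def Claim_equal_normalize_guest : Prop := ∀ (name : String), Dom_normalize_guest name → Spec_normalize_guest name (normalize_guest name)

-- ===== LEMMAS AND PROOFS =====

-- the kept-character predicate
def pvKeep (ch : Char) : Bool := PySem.Chars.isalnum ch || ch == '-'

-- pvSlugLoop without the accumulator
def pvScan : List Char → Bool → List Char
  | [], _ => []
  | c :: rest, ps =>
    if PySem.Chars.isspace c then (if ps then [] else ['-']) ++ pvScan rest true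
    else (if pvKeep c then [c] else []) ++ pvScan rest false

lemma pvSlugLoop_eq (L : List Char) : ∀ acc ps, pvSlugLoop L acc ps = acc ++ pvScan L ps := by
  induction L with
  | nil => intro acc ps; simp [pvSlugLoop, pvScan]
  | cons c rest ih =>
    intro acc ps
    simp only [pvSlugLoop, pvScan, pvKeep]
    split_ifs <;> simp [ih]

-- split₀.go without the word accumulator
def pvWgo : List Char → List Char → List (List Char)
  | [], cur => if cur.isEmpty then [] else [cur.reverse]
  | c :: rest, cur =>
    if PySem.Chars.isspace c then
      (if cur.isEmpty then pvWgo rest [] else cur.reverse :: pvWgo rest [])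
    else pvWgo rest (c :: cur)

lemma split₀_go_eq (L : List Char) : ∀ cur acc,
    PySem.Chars.split₀.go L cur acc = acc.reverse ++ pvWgo L cur := by
  induction L with
  | nil => intro cur acc; simp [PySem.Chars.split₀.go, pvWgo]; split_ifs <;> simp
  | cons c rest ih =>
    intro cur acc
    simp only [PySem.Chars.split₀.go, pvWgo]
    split_ifs with h1 h2 <;> simp [ih]

lemma pvWgo_ne_nil (L : List Char) : ∀ cur, cur ≠ [] → pvWgo L cur ≠ [] := by
  induction L with
  | nil => intro cur h; simp [pvWgo, List.isEmpty_iff, h]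
  | cons c rest ih =>
    intro cur h
    simp only [pvWgo, List.isEmpty_iff, h]
    split_ifs <;> simp_all [ih (c :: cur)]

lemma flatMap_dash (ws : List (List Char)) (h : ws ≠ []) :
    ws.flatMap (fun w => '-' :: w) = '-' :: PySem.Chars.join ['-'] ws := by
  induction ws with
  | nil => simp at h
  | cons w ws ih =>
    cases ws with
    | nil => simp [PySem.Chars.join, List.intercalate]
    | cons w' ws' =>
      simp only [List.flatMap_cons] at ih ⊢
      rw [ih (by simp)]
      simp [PySem.Chars.join, List.intercalate, List.intersperse]

-- no trailing whitespace
def pvNoTail (L : List Char) : Prop := ∀ c ∈ L.getLast?, PySem.Chars.isspace c = false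

lemma pvNoTail_of_cons {c : Char} {rest : List Char} (h : pvNoTail (c :: rest)) : pvNoTail rest := by
  cases rest with
  | nil => intro x hx; simp at hx
  | cons d ds => intro x hx; exact h x (by simpa [List.getLast?_cons_cons] using hx)

lemma pvNoTail_space_ne_nil {c : Char} {rest : List Char} (h : pvNoTail (c :: rest))
    (hs : PySem.Chars.isspace c = true) : rest ≠ [] := by
  intro he; subst he
  have := h c (by simp)
  simp [this] at hs

-- the joint invariant: A's join-filter pipeline over pvWgo equals B's scan
lemma pvMain (L : List Char) (hL : pvNoTail L) :
    (∀ cur, cur ≠ [] →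
      (PySem.Chars.join ['-'] (pvWgo L cur)).filter pvKeep
        = cur.reverse.filter pvKeep ++ pvScan L false)
    ∧ (L ≠ [] →
      ((pvWgo L []).flatMap (fun w => '-' :: w)).filter pvKeep = '-' :: pvScan L true) := by
  induction L with
  | nil =>
    refine ⟨?_, by simp⟩
    intro cur hc
    simp [pvWgo, List.isEmpty_iff, hc, PySem.Chars.join, List.intercalate, pvScan]
  | cons c rest ih =>
    have ihr := ih (pvNoTail_of_cons hL)
    constructor
    · intro cur hc
      by_cases hs : PySem.Chars.isspace c = true
      · have hrest : rest ≠ [] := pvNoTail_space_ne_nil hL hs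
        have hjoin : PySem.Chars.join ['-'] (cur.reverse :: pvWgo rest []) =
            cur.reverse ++ (pvWgo rest []).flatMap (fun w => '-' :: w) := by
          cases hw : pvWgo rest [] with
          | nil => simp [PySem.Chars.join, List.intercalate]
          | cons w ws =>
            rw [flatMap_dash _ (by simp), ← hw]
            simp [PySem.Chars.join, List.intercalate, List.intersperse, hw]
        simp only [pvWgo, List.isEmpty_iff, hc, if_neg hc, hs, if_true, if_false, hjoin]
        rw [List.filter_append, ihr.2 hrest]
        have : pvKeep '-' = true := by decide
        simp [pvScan, hs, this]
      · simp only [pvWgo, hs, if_false, Bool.false_eq_true]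
        rw [ihr.1 (c :: cur) (by simp)]
        by_cases hk : pvKeep c <;> simp [pvScan, hs, hk, List.filter_append, List.filter_cons]
    · intro _
      by_cases hs : PySem.Chars.isspace c = true
      · have hrest : rest ≠ [] := pvNoTail_space_ne_nil hL hs
        simp only [pvWgo, hs, if_true, List.isEmpty_nil]
        rw [ihr.2 hrest]
        simp [pvScan, hs]
      · simp only [pvWgo, hs, if_false, List.isEmpty_nil, Bool.false_eq_true]
        have hmem : pvWgo rest [c] ≠ [] := pvWgo_ne_nil rest [c] (by simp)
        rw [flatMap_dash _ hmem]
        have : pvKeep '-' = true := by decide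
        simp only [List.filter_cons, this, if_true]
        rw [ihr.1 [c] (by simp)]
        simp [pvScan, hs, List.filter_cons, List.filter_singleton]

lemma pvDropWhile_idem (p : Char → Bool) (l : List Char) :
    List.dropWhile p (List.dropWhile p l) = List.dropWhile p l := by
  cases h : List.dropWhile p l with
  | nil => simp
  | cons a t =>
    have hh := List.head?_dropWhile_not p l
    rw [h] at hh
    simp only [List.head?_cons] at hh
    simp [List.dropWhile_cons, hh]

lemma pvDropWhile_prefix (p : Char → Bool) {u v : List Char} (h : u <+: v)
    (hv : List.dropWhile p v = v) : List.dropWhile p u = u := by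
  cases u with
  | nil => simp
  | cons a t =>
    obtain ⟨s, hs⟩ := h
    have hpa : p a = false := by
      by_contra hpa
      simp only [Bool.not_eq_false] at hpa
      rw [← hs] at hv
      simp only [List.cons_append, List.dropWhile_cons, hpa, if_true] at hv
      have h1 := List.IsSuffix.length_le (List.dropWhile_suffix (l := t ++ s) p)
      have h2 := congrArg List.length hv
      simp at h1 h2
      omega
    simp [List.dropWhile_cons, hpa]

lemma pvRstrip_prefix (u : List Char) : PySem.Chars.rstrip u <+: u := by
  have hsuf : (PySem.Chars.rstrip u).reverse <:+ u.reverse := by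
    simpa [PySem.Chars.rstrip] using
      List.dropWhile_suffix (l := u.reverse) PySem.Chars.isspace
  exact List.reverse_suffix.mp hsuf

lemma pvRstrip_idem (u : List Char) :
    PySem.Chars.rstrip (PySem.Chars.rstrip u) = PySem.Chars.rstrip u := by
  simp [PySem.Chars.rstrip, pvDropWhile_idem]

lemma pvStrip_idem (L : List Char) :
    PySem.Chars.strip (PySem.Chars.strip L) = PySem.Chars.strip L := by
  have h1 : List.dropWhile PySem.Chars.isspace (PySem.Chars.lstrip L) = PySem.Chars.lstrip L := by
    simpa [PySem.Chars.lstrip] using pvDropWhile_idem PySem.Chars.isspace L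
  have h2 : PySem.Chars.lstrip (PySem.Chars.strip L) = PySem.Chars.strip L := by
    simp only [PySem.Chars.strip, PySem.Chars.lstrip]
    exact pvDropWhile_prefix PySem.Chars.isspace (pvRstrip_prefix (PySem.Chars.lstrip L)) h1
  calc PySem.Chars.strip (PySem.Chars.strip L)
      = PySem.Chars.rstrip (PySem.Chars.strip L) := by
        simp only [PySem.Chars.strip]; rw [show PySem.Chars.lstrip (PySem.Chars.rstrip (PySem.Chars.lstrip L)) = PySem.Chars.rstrip (PySem.Chars.lstrip L) from h2]
    _ = PySem.Chars.strip L := by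
        simp only [PySem.Chars.strip]; exact pvRstrip_idem (PySem.Chars.lstrip L)


-- a stripped list: no leading, no trailing whitespace
lemma pvStripped_lstrip {L : List Char} (h : PySem.Chars.strip L = L) :
    PySem.Chars.lstrip L = L := by
  have hsuf : PySem.Chars.lstrip L <:+ L := by
    simpa [PySem.Chars.lstrip] using List.dropWhile_suffix (l := L) PySem.Chars.isspace
  have hpre : L <+: PySem.Chars.lstrip L := by
    have := pvRstrip_prefix (PySem.Chars.lstrip L)
    rwa [show PySem.Chars.rstrip (PySem.Chars.lstrip L) = L from h] at this
  exact List.IsSuffix.eq_of_length hsuf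
    (le_antisymm (List.IsSuffix.length_le hsuf) (List.IsPrefix.length_le hpre))

lemma pvStripped_rstrip {L : List Char} (h : PySem.Chars.strip L = L) :
    PySem.Chars.rstrip L = L := by
  have hl := pvStripped_lstrip h
  calc PySem.Chars.rstrip L = PySem.Chars.rstrip (PySem.Chars.lstrip L) := by rw [hl]
    _ = L := h

lemma pvStripped_noLead {L : List Char} (h : PySem.Chars.strip L = L) :
    List.dropWhile PySem.Chars.isspace L = L := by
  simpa [PySem.Chars.lstrip] using pvStripped_lstrip h

lemma pvStripped_noTail {L : List Char} (h : PySem.Chars.strip L = L) : pvNoTail L := by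
  have h2 := pvStripped_rstrip h
  have h3 : List.dropWhile PySem.Chars.isspace L.reverse = L.reverse := by
    have := congrArg List.reverse h2
    simpa [PySem.Chars.rstrip] using this
  intro c hc
  have hh := List.head?_dropWhile_not PySem.Chars.isspace L.reverse
  rw [h3, List.head?_reverse] at hh
  rw [Option.mem_def] at hc
  rw [hc] at hh
  exact hh

-- lowering preserves whitespace-ness, so strip commutes with lower
lemma pvIsspace_lowerChar (c : Char) :
    PySem.Chars.isspace (PySem.Chars.lowerChar c) = PySem.Chars.isspace c := by
  simp only [PySem.Chars.lowerChar]
  split_ifs with h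
  · have hA : 65 ≤ c.toNat ∧ c.toNat ≤ 90 := by
      simp only [PySem.Chars.isupper, Bool.and_eq_true, decide_eq_true_eq, Char.le_def] at h
      exact ⟨h.1, h.2⟩
    have hv : (c.toNat + 32).isValidChar := by left; omega
    have ht : (Char.ofNat (c.toNat + 32)).toNat = c.toNat + 32 := by
      rw [Char.toNat_ofNat, if_pos hv]
    have hs1 : PySem.Chars.isspace (Char.ofNat (c.toNat + 32)) = false := by
      simp [PySem.Chars.isspace, ht]; omega
    have hs2 : PySem.Chars.isspace c = false := by
      simp [PySem.Chars.isspace]; omega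
    rw [hs1, hs2]
  · rfl

lemma pvStrip_lower (t : List Char) :
    PySem.Chars.strip (PySem.Chars.lower t) = PySem.Chars.lower (PySem.Chars.strip t) := by
  have hcomp : (PySem.Chars.isspace ∘ PySem.Chars.lowerChar) = PySem.Chars.isspace := by
    funext c; simp [Function.comp, pvIsspace_lowerChar]
  simp only [PySem.Chars.strip, PySem.Chars.lstrip, PySem.Chars.rstrip, PySem.Chars.lower]
  rw [List.dropWhile_map, hcomp, ← List.map_reverse, List.dropWhile_map, hcomp, List.map_reverse]

-- the central list-level fact: A's slug characters = B's slug characters, for stripped g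
lemma pvSlug_eq (t : List Char) (h : PySem.Chars.strip t = t) :
    (PySem.Chars.join ['-'] (PySem.Chars.split₀ (PySem.Chars.strip (PySem.Chars.lower t)))).filter pvKeep
      = pvScan (PySem.Chars.lower t) false := by
  rw [pvStrip_lower, h]
  set M := PySem.Chars.lower t with hM
  have hMs : PySem.Chars.strip M = M := by rw [hM, pvStrip_lower, h]
  have hLead := pvStripped_noLead hMs
  have hTail := pvStripped_noTail hMs
  have hsplit : PySem.Chars.split₀ M = pvWgo M [] := by
    simp [PySem.Chars.split₀, split₀_go_eq]
  rw [hsplit]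
  cases hMc : M with
  | nil => simp [pvWgo, PySem.Chars.join, List.intercalate, pvScan]
  | cons c rest =>
    have hc : PySem.Chars.isspace c = false := by
      rw [hMc] at hLead
      by_contra hcc
      simp only [Bool.not_eq_false] at hcc
      simp only [List.dropWhile_cons, hcc, if_true] at hLead
      have h1 := List.IsSuffix.length_le (List.dropWhile_suffix (l := rest) PySem.Chars.isspace)
      have h2 := congrArg List.length hLead
      simp at h2
      omega
    rw [hMc] at hTail
    have hrt : pvNoTail rest := pvNoTail_of_cons hTail
    have := (pvMain rest hrt).1 [c] (by simp)
    simp only [pvWgo, hc, Bool.false_eq_true, if_false, List.isEmpty_nil]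
    rw [this]
    simp [pvScan, hc, List.filter_cons]

-- ===== VERDICT (by name: the statement is the Claim_ definition above) =====
theorem normalize_guest_spec : Claim_equal_normalize_guest := by
  intro name _
  unfold Spec_normalize_guest normalize_guest normalize_guest_alt
  set g := (if (PySem.Str.strip (if name == "" then "" else name)) == "" then "Unknown"
            else PySem.Str.strip (if name == "" then "" else name)) with hg
  have hstripped : PySem.Chars.strip g.toList = g.toList := by
    rw [hg]
    split_ifs
    all_goals first
      | decide
      | (rw [PySem.Str.toList_strip]; exact pvStrip_idem _)
  have hlist :
      ((PySem.Str.join "-" (PySem.Str.split₀ (PySem.Str.strip (PySem.Str.lower g)))).toList.filter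
          (fun ch => PySem.Chars.isalnum ch || ch == '-'))
        = pvSlugLoop (PySem.Str.lower g).toList [] false := by
    rw [pvSlugLoop_eq]
    simp only [List.nil_append]
    rw [PySem.Str.toList_join, PySem.Str.split₀_map_toList, PySem.Str.toList_strip,
      PySem.Str.toList_lower,
      show ("-" : String).toList = ['-'] from rfl]
    have := pvSlug_eq g.toList hstripped
    simpa [pvKeep] using this
  simp only []
  rw [hlist]
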